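-- pv_equiv track=rewrite | github.com/imperosol/ue_checker | src/export.py | __get_cum_row_per_cat
-- ===== SOURCE A (Python) =====
-- def __get_cum_row_per_cat(row_per_category: dict[str, int]) -> tuple[int, dict[str, int]]:
--     """
--     Build and return a cumulative dict based on the dict given and the value of the sum of everything.
--     Example: ::
--         {'a': 1, 'b': 5, 'c': 3, 'd': 4}
--     Will
--     return: ::
--         tuple(13, {'a': 1, 'b': 6, 'c': 9, 'd': 13}
--     """
--     cum_sum = 0
--     result_dict = dict()
--     for key, nb_rows in row_per_category.items():
--         if type(nb_rows) != int:
--             raise TypeError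
--         result_dict[key] = nb_rows + cum_sum
--         cum_sum += nb_rows
--     return cum_sum, result_dict
-- ===== SOURCE B (Python) =====
-- def __get_cum_row_per_cat(row_per_category: dict[str, int]) -> tuple[int, dict[str, int]]:
--     """Stateless prefix-sum formulation: after validating every value, each
--     key's cumulative entry is defined directly as the sum of the value slice
--     up to and including it, and the total is the sum of all values; no
--     running accumulator is carried between entries."""
--     items = list(row_per_category.items())
--     for _, v in items:
--         if type(v) != int:
--             raise TypeError
--     total = sum(v for _, v in items)
--     result = {k: sum(v for _, v in items[:i + 1]) for i, (k, _) in enumerate(items)}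
--     return total, result
-- ===== Notes on version B (the rewrite author's own statement) =====
-- stated objective: alternative
-- what changed: Replaced A's single running-accumulator loop that mutates the result dict with a stateless nested-scan formulation: validate first, then define each key's entry independently as the sum of the value slice up to it and the total as the sum of all values, trading A's O(n) single pass for a definition-style O(n^2) prefix recomputation with no loop-carried state.
import Mathlib
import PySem

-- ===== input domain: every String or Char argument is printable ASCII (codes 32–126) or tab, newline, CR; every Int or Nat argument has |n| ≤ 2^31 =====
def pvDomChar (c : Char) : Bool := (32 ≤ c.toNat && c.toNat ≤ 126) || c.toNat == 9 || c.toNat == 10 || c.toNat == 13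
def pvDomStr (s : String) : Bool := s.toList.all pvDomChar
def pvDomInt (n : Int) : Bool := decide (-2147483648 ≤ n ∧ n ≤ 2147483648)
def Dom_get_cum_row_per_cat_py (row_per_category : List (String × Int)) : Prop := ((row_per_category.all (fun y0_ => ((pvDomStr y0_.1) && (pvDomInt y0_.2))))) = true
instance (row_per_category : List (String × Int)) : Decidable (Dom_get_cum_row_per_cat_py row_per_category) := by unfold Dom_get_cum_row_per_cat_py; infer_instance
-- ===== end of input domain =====

-- B replaces A's running-accumulator loop with a stateless nested-scan formulation
-- (each entry = sum of the value slice up to it; total = sum of all values); objective: alternative.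


-- ===== PORT A =====
-- A's `type(nb_rows) != int` check can never fire here (values are Int by the type
-- convention), so the TypeError branch is vacuous and omitted.
def get_cum_row_per_cat_py (row_per_category : List (String × Int)) : Int × (List (String × Int)) :=
  let r := row_per_category.foldl
    (fun (st : Int × PySem.Dict String Int) kv => (st.1 + kv.2, st.2.insert kv.1 (kv.2 + st.1)))
    (0, PySem.Dict.empty)
  (r.1, r.2.items)

-- ===== PORT B =====
-- B's `type(v) != int` validation pass is vacuous here (values are Int) and omitted.
def get_cum_row_per_cat_py_alt (row_per_category : List (String × Int)) : Int × (List (String × Int)) :=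
  let items := row_per_category
  let total := (items.map (·.2)).sum
  let result := PySem.Dict.ofList ((PySem.List.enumerate items 0).map
      (fun p => (p.2.1, ((PySem.List.slice items none (some (p.1 + 1))).map (·.2)).sum)))
  (total, result.items)

-- ===== PRECONDITION & SPEC =====
def Spec_get_cum_row_per_cat_py (row_per_category : List (String × Int)) (out : Int × (List (String × Int))) : Prop := out = get_cum_row_per_cat_py_alt row_per_category
instance (row_per_category : List (String × Int)) (out : Int × (List (String × Int))) : Decidable (Spec_get_cum_row_per_cat_py row_per_category out) := by unfold Spec_get_cum_row_per_cat_py; infer_instance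

-- ===== CLAIM (what is proved, stated in full; the proofs are below) =====
def Claim_equal_get_cum_row_per_cat_py : Prop := ∀ (row_per_category : List (String × Int)), Dom_get_cum_row_per_cat_py row_per_category → Spec_get_cum_row_per_cat_py row_per_category (get_cum_row_per_cat_py row_per_category)

-- ===== LEMMAS AND PROOFS =====

-- the (key, running-sum-so-far + value) pairs A's loop inserts, starting from offset c
def pvPairs (c : Int) : List (String × Int) → List (String × Int)
  | [] => []
  | (k, v) :: rest => (k, c + v) :: pvPairs (c + v) rest

theorem pvPairs_length (c : Int) (l : List (String × Int)) : (pvPairs c l).length = l.length := by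
  induction l generalizing c with
  | nil => rfl
  | cons kv rest ih => obtain ⟨k, v⟩ := kv; simp [pvPairs, ih]

theorem pvPairs_getElem (c : Int) (l : List (String × Int)) (i : Nat) (h : i < l.length) :
    (pvPairs c l)[i]'(by rw [pvPairs_length]; exact h)
      = (l[i].1, c + ((l.take (i + 1)).map (·.2)).sum) := by
  induction l generalizing c i with
  | nil => simp at h
  | cons kv rest ih =>
    obtain ⟨k, v⟩ := kv
    cases i with
    | zero => simp [pvPairs]
    | succ j =>
      have := ih (c + v) j (by simpa using h)
      simp only [pvPairs, List.getElem_cons_succ, List.take_succ_cons, List.map_cons,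
        List.sum_cons] at this ⊢
      rw [this]; ring_nf

-- A's fold characterized: running sum = c + Σ values, dict = successive inserts of pvPairs
theorem pvFold_eq (l : List (String × Int)) (c : Int) (d : PySem.Dict String Int) :
    l.foldl (fun (st : Int × PySem.Dict String Int) kv =>
        (st.1 + kv.2, st.2.insert kv.1 (kv.2 + st.1))) (c, d)
      = (c + (l.map (·.2)).sum, (pvPairs c l).foldl (fun d p => d.insert p.1 p.2) d) := by
  induction l generalizing c d with
  | nil => simp [pvPairs]
  | cons kv rest ih =>
    obtain ⟨k, v⟩ := kv
    simp only [List.foldl_cons, List.map_cons, List.sum_cons, pvPairs]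
    rw [ih]
    ring_nf

-- B's enumerate/slice list is exactly pvPairs 0
theorem pvPairs_eq_enumerate_map (l : List (String × Int)) :
    (PySem.List.enumerate l 0).map
        (fun p => (p.2.1, ((PySem.List.slice l none (some (p.1 + 1))).map (·.2)).sum))
      = pvPairs 0 l := by
  apply List.ext_getElem
  · simp [PySem.List.length_enumerate, pvPairs_length]
  · intro i h1 h2
    have hi : i < l.length := by simpa [PySem.List.length_enumerate] using h1
    rw [pvPairs_getElem 0 l i hi]
    simp only [List.getElem_map, PySem.List.getElem_enumerate, zero_add]
    have hslice : PySem.List.slice l none (some ((i : Int) + 1)) = l.take (i + 1) := by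
      have := PySem.List.slice_to_natCast l (i + 1)
      simpa using this
    rw [hslice]

-- ===== VERDICT (by name: the statement is the Claim_ definition above) =====
theorem get_cum_row_per_cat_py_spec : Claim_equal_get_cum_row_per_cat_py := by
  intro l _
  show get_cum_row_per_cat_py l = get_cum_row_per_cat_py_alt l
  simp only [get_cum_row_per_cat_py, get_cum_row_per_cat_py_alt, pvFold_eq,
    pvPairs_eq_enumerate_map, PySem.Dict.ofList, zero_add]
  rfl
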